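-- pv_equiv track=rewrite | github.com/RC-CHN/ReuleauxCoder | reuleauxcoder/domain/context/manager.py | _find_recent_user_turn_boundary
-- ===== SOURCE A (Python) =====
-- def _find_recent_user_turn_boundary(
--     messages: list[dict], keep_recent_user_turns: int
-- ) -> int:
--     """Return the split index that keeps the most recent N user turns and everything after them."""
--     if keep_recent_user_turns <= 0:
--         return len(messages)
--
--     user_turn_starts = [
--         i for i, msg in enumerate(messages) if msg.get("role") == "user"
--     ]
--     if len(user_turn_starts) <= keep_recent_user_turns:
--         return 0
--     return user_turn_starts[-keep_recent_user_turns]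
-- ===== SOURCE B (Python) =====
-- def _find_recent_user_turn_boundary(
--     messages: list[dict], keep_recent_user_turns: int
-- ) -> int:
--     """Return the split index that keeps the most recent N user turns and everything after them."""
--     if keep_recent_user_turns <= 0:
--         return len(messages)
--     count = 0
--     boundary = 0
--     for i in range(len(messages) - 1, -1, -1):
--         if messages[i].get("role") == "user":
--             count += 1
--             if count == keep_recent_user_turns:
--                 boundary = i
--             elif count > keep_recent_user_turns:
--                 return boundary
--     return 0
-- ===== Notes on version B (the rewrite author's own statement) =====
-- stated objective: simpler
-- what changed: Replaces building the full list of user-turn indices plus negative indexing with a single backward scan that keeps a counter and a candidate boundary and returns early once more than N user turns have been seen.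
import Mathlib
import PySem

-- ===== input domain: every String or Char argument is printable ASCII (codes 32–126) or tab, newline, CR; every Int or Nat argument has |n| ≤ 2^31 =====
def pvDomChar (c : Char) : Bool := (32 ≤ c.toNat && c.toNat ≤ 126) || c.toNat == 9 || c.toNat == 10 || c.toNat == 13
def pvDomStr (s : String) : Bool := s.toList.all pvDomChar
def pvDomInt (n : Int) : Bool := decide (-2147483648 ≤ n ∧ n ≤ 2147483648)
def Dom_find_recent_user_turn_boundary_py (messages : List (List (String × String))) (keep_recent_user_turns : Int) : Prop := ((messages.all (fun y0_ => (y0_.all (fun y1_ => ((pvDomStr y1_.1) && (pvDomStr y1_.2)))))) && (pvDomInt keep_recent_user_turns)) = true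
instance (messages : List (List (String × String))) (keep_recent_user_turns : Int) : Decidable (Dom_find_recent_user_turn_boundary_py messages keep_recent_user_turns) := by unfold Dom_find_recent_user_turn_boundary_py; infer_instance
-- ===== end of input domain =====

-- ===== PORT A =====
-- B replaces A's full list of user-turn indices + negative indexing by one backward
-- scan with a counter and early exit (objective: simpler/alternative, not faster).

-- msg.get("role"): first-match lookup in the association list (dict convention)
def pvRole (m : List (String × String)) : Option String := m.lookup "role"

def find_recent_user_turn_boundary_py (messages : List (List (String × String))) (keep_recent_user_turns : Int) : Int :=
  if keep_recent_user_turns ≤ 0 then (messages.length : Int)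
  else
    let user_turn_starts :=
      ((PySem.List.enumerate messages).filter (fun p => pvRole p.2 == some "user")).map (·.1)
    if (user_turn_starts.length : Int) ≤ keep_recent_user_turns then 0
    else
      -- user_turn_starts[-keep_recent_user_turns]; the index is provably in range here,
      -- so .getD 0 never fires (exact on all admitted inputs)
      (PySem.List.pyGet? user_turn_starts (-keep_recent_user_turns)).getD 0

-- ===== PORT B =====
-- the backward loop of Source B over (index, message) pairs, most recent first
def pvAltLoop (rest : List (Int × List (String × String))) (count boundary n : Int) : Int :=
  match rest with
  | [] => 0
  | (i, m) :: rest =>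
    if pvRole m == some "user" then
      if count + 1 == n then pvAltLoop rest (count + 1) i n
      else if count + 1 > n then boundary
      else pvAltLoop rest (count + 1) boundary n
    else pvAltLoop rest count boundary n

def find_recent_user_turn_boundary_py_alt (messages : List (List (String × String))) (keep_recent_user_turns : Int) : Int :=
  if keep_recent_user_turns ≤ 0 then (messages.length : Int)
  else pvAltLoop (PySem.List.enumerate messages).reverse 0 0 keep_recent_user_turns

-- ===== PRECONDITION & SPEC =====
def Spec_find_recent_user_turn_boundary_py (messages : List (List (String × String))) (keep_recent_user_turns : Int) (out : Int) : Prop := out = find_recent_user_turn_boundary_py_alt messages keep_recent_user_turns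
instance (messages : List (List (String × String))) (keep_recent_user_turns : Int) (out : Int) : Decidable (Spec_find_recent_user_turn_boundary_py messages keep_recent_user_turns out) := by unfold Spec_find_recent_user_turn_boundary_py; infer_instance

-- ===== CLAIM (what is proved, stated in full; the proofs are below) =====
def Claim_equal_find_recent_user_turn_boundary_py : Prop := ∀ (messages : List (List (String × String))) (keep_recent_user_turns : Int), Dom_find_recent_user_turn_boundary_py messages keep_recent_user_turns → Spec_find_recent_user_turn_boundary_py messages keep_recent_user_turns (find_recent_user_turn_boundary_py messages keep_recent_user_turns)


-- ===== LEMMAS AND PROOFS =====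

-- once the counter has reached n, the loop returns boundary at the next user message, 0 if none
theorem pvAltLoop_full (R : List (Int × List (String × String))) (b n : Int) :
    pvAltLoop R n b n = if R.countP (fun p => pvRole p.2 == some "user") = 0 then 0 else b := by
  induction R generalizing b with
  | nil => simp [pvAltLoop]
  | cons hd tl ih =>
    obtain ⟨i, m⟩ := hd
    by_cases hu : (pvRole m == some "user") = true
    · simp only [pvAltLoop, hu, if_pos]
      have h1 : (n + 1 == n) = false := by simp
      have h2 : n + 1 > n := by omega
      simp [h1, h2, hu]
    · have hl : pvAltLoop ((i, m) :: tl) n b n = pvAltLoop tl n b n := by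
        simp [pvAltLoop, hu]
      rw [hl, ih, List.countP_cons, if_neg hu, Nat.add_zero]

-- with n - k users still wanted (1 ≤ k ≤ n), the loop returns 0 when at most k users remain,
-- else the index of the k-th user from the front of R
theorem pvAltLoop_lt (R : List (Int × List (String × String))) (k : Nat) (b n : Int)
    (hk1 : 1 ≤ k) (hkn : (k : Int) ≤ n) :
    pvAltLoop R (n - (k : Int)) b n =
      if R.countP (fun p => pvRole p.2 == some "user") ≤ k then 0
      else ((R.filter (fun p => pvRole p.2 == some "user")).map (·.1)).getD (k - 1) 0 := by
  induction R generalizing k b with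
  | nil => simp [pvAltLoop]
  | cons hd tl ih =>
    obtain ⟨i, m⟩ := hd
    by_cases hu : (pvRole m == some "user") = true
    · simp only [pvAltLoop, hu, if_pos]
      rcases Nat.eq_or_lt_of_le hk1 with h1 | h2
      · -- k = 1 : the counter reaches n at this message
        have hk : k = 1 := h1.symm
        subst hk
        simp only [Nat.cast_one]
        rw [if_pos (by simp)]
        rw [show n - (1 : Int) + 1 = n from by ring, pvAltLoop_full]
        rw [List.countP_cons, List.filter_cons, if_pos hu, if_pos hu]
        by_cases hc : tl.countP (fun p => pvRole p.2 == some "user") = 0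
        · rw [if_pos hc, if_pos (by omega)]
        · rw [if_neg hc, if_neg (by omega)]
          simp
      · -- k ≥ 2 : keep scanning with k - 1 still wanted
        have heq : ((n - (k : Int) + 1) == n) = false := by
          simp only [beq_eq_false_iff_ne, ne_eq]; omega
        have hgt : ¬ (n - (k : Int) + 1 > n) := by omega
        rw [if_neg (by simp [heq]), if_neg hgt]
        have hstep : n - (k : Int) + 1 = n - ((k - 1 : Nat) : Int) := by
          push_cast [Nat.cast_sub (by omega : 1 ≤ k)]; ring
        rw [hstep, ih (k - 1) b (by omega)
          (by push_cast [Nat.cast_sub (by omega : 1 ≤ k)]; omega)]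
        rw [List.countP_cons, List.filter_cons]
        simp only [hu, if_pos, List.map_cons]
        by_cases hc : tl.countP (fun p => pvRole p.2 == some "user") ≤ k - 1
        · rw [if_pos hc, if_pos (by omega)]
        · rw [if_neg hc, if_neg (by omega)]
          rw [show k - 1 = (k - 2) + 1 from by omega, List.getD_cons_succ]
          congr 1
    · have hl : ∀ c b', pvAltLoop ((i, m) :: tl) c b' n = pvAltLoop tl c b' n := by
        intro c b'; simp [pvAltLoop, hu]
      rw [hl, ih k b hk1 hkn, List.countP_cons, List.filter_cons,
        if_neg hu, if_neg hu, Nat.add_zero]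

-- ===== VERDICT (by name: the statement is the Claim_ definition above) =====
theorem find_recent_user_turn_boundary_py_spec : Claim_equal_find_recent_user_turn_boundary_py := by
  intro messages n _
  unfold Spec_find_recent_user_turn_boundary_py
  unfold find_recent_user_turn_boundary_py find_recent_user_turn_boundary_py_alt
  by_cases hn : n ≤ 0
  · simp [hn]
  · simp only [hn, ite_false]
    have hk : ((n.toNat : Int)) = n := Int.toNat_of_nonneg (by omega)
    have key := pvAltLoop_lt (PySem.List.enumerate messages).reverse n.toNat 0 n
      (by omega) (by omega)
    rw [show n - (n.toNat : Int) = 0 from by omega] at key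
    rw [key]
    have hcnt : (PySem.List.enumerate messages).reverse.countP
        (fun p => pvRole p.2 == some "user")
        = (PySem.List.enumerate messages).countP (fun p => pvRole p.2 == some "user") := by
      rw [List.countP_eq_length_filter, List.filter_reverse, List.length_reverse,
        ← List.countP_eq_length_filter]
    have hfl : (((PySem.List.enumerate messages).reverse.filter
          (fun p => pvRole p.2 == some "user")).map (·.1))
        = ((((PySem.List.enumerate messages).filter
          (fun p => pvRole p.2 == some "user")).map (·.1))).reverse := by
      rw [List.filter_reverse, List.map_reverse]
    set us := (((PySem.List.enumerate messages).filter
      (fun p => pvRole p.2 == some "user")).map (·.1)) with hus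
    have hlen : us.length
        = (PySem.List.enumerate messages).countP (fun p => pvRole p.2 == some "user") := by
      rw [hus, List.length_map, List.countP_eq_length_filter]
    by_cases hle : (us.length : Int) ≤ n
    · rw [if_pos hle, if_pos (by omega)]
    · rw [if_neg hle, if_neg (by omega), hfl]
      have hlt : n.toNat ≤ us.length := by omega
      rw [show (-n : Int) = -((n.toNat : Int)) from by omega,
        PySem.List.pyGet?_neg_natCast us n.toNat (by omega) hlt]
      have h1 : us.length - n.toNat < us.length := by omega
      have h2 : n.toNat - 1 < us.reverse.length := by rw [List.length_reverse]; omega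
      rw [List.getD_eq_getElem?_getD, List.getElem?_eq_getElem h2,
        List.getElem?_eq_getElem h1]
      simp only [Option.getD_some, List.getElem_reverse]
      congr 1
      omega
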